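-- pv_equiv track=rewrite | github.com/Nomen-Heroum/Advent_of_Code | 2018/day25.py | count_constellations
-- ===== SOURCE A (Python) =====
-- from copy import deepcopy
--
-- def count_constellations(points):
--     def distance(p1, p2):
--         return sum(abs(x1 - x2) for x1, x2 in zip(p1, p2))
--
--     constellations = set()
--     for point in points:
--         new_constellation = frozenset({point})  # Frozen set to store in set
--         for const in deepcopy(constellations):  # Copy to manage mutations during iteration
--             if any(distance(point, p) <= 3 for p in const):
--                 new_constellation |= const
--                 constellations.remove(const)
--         constellations.add(new_constellation)
--
--     return len(constellations)
-- ===== SOURCE B (Python) =====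
-- def count_constellations(points):
--     entries = []  # list of (point, label); equal labels = same constellation
--     for point in points:
--         near = [lab for p, lab in entries
--                 if sum(abs(x1 - x2) for x1, x2 in zip(point, p)) <= 3]
--         if near:
--             tgt = min(near)
--             entries = [(p, tgt if lab in near else lab) for p, lab in entries]
--         else:
--             tgt = len(entries)
--         entries.append((point, tgt))
--     return len({lab for _, lab in entries})
-- ===== Notes on version B (the rewrite author's own statement) =====
-- stated objective: faster
-- what changed: Replaces A's set-of-frozensets that is deepcopied and re-merged at every point by a flat list of (point, label) pairs with label propagation (relabel all near labels to their minimum), counting distinct labels at the end.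
import Mathlib
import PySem

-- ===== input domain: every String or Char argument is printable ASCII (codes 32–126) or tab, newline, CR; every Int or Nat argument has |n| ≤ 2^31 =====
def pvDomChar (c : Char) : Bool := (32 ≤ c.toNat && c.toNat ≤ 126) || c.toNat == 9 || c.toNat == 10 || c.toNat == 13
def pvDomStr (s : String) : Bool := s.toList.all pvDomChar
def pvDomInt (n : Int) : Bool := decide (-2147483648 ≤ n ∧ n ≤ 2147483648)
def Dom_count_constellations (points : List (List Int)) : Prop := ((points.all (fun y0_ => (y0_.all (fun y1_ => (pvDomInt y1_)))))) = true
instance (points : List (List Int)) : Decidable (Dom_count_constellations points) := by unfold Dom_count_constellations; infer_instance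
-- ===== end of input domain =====

-- B replaces A's set of frozensets (deepcopied and re-merged at every point) by a flat
-- (point, label) list with label propagation, avoiding the per-point deepcopy of the whole state.

-- ===== PORT A =====
-- shared helper: both Pythons compute sum(abs(x1 - x2) for x1, x2 in zip(p1, p2))
def pvManhattan (p1 p2 : List Int) : Int :=
  (p1.zip p2).foldl (fun s ab => s + |ab.1 - ab.2|) 0

-- body of A's outer loop: merge every near constellation into new_constellation, keep the rest
def pvStepA (cs : List (PySem.Set (List Int))) (point : List Int) :
    List (PySem.Set (List Int)) :=
  let st := cs.foldl
    (fun (st : PySem.Set (List Int) × List (PySem.Set (List Int))) c =>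
      if c.any (fun p => decide (pvManhattan point p ≤ 3)) then
        (PySem.Set.union st.1 c, st.2)
      else (st.1, st.2 ++ [c]))
    (PySem.Set.ofList [point], [])
  st.2 ++ [st.1]

def count_constellations (points : List (List Int)) : Int :=
  ((points.foldl pvStepA []).length : Int)

-- ===== PORT B =====
-- body of B's loop: collect labels of near entries, relabel them all to the minimum
def pvStepB (entries : List (List Int × Int)) (point : List Int) :
    List (List Int × Int) :=
  let near := (entries.filter (fun e => decide (pvManhattan point e.1 ≤ 3))).map Prod.snd
  match PySem.List.min? near (fun x => x) with
  | some tgt => (entries.map (fun e => if e.2 ∈ near then (e.1, tgt) else e)) ++ [(point, tgt)]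
  | none => entries ++ [(point, (entries.length : Int))]

def count_constellations_alt (points : List (List Int)) : Int :=
  (((PySem.Set.ofList ((points.foldl pvStepB []).map Prod.snd)).length : Int))

-- ===== PRECONDITION & SPEC =====
def Spec_count_constellations (points : List (List Int)) (out : Int) : Prop := out = count_constellations_alt points
instance (points : List (List Int)) (out : Int) : Decidable (Spec_count_constellations points out) := by unfold Spec_count_constellations; infer_instance

-- ===== CLAIM (what is proved, stated in full; the proofs are below) =====
def Claim_equal_count_constellations : Prop := ∀ (points : List (List Int)), Dom_count_constellations points → Spec_count_constellations points (count_constellations points)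

-- ===== LEMMAS AND PROOFS =====

-- the coupling invariant: A's constellations and B's label classes are the same partition,
-- witnessed by a duplicate-free list g of labels aligned with A's constellation list
def pvInv (cs : List (PySem.Set (List Int))) (st : List (List Int × Int)) : Prop :=
  ∃ g : List Int,
    List.Forall₂ (fun c l => (∀ p, p ∈ c ↔ (p, l) ∈ st) ∧ l ∈ st.map Prod.snd) cs g ∧
    g.Nodup ∧ (∀ l ∈ st.map Prod.snd, l ∈ g) ∧ (∀ l ∈ g, 0 ≤ l ∧ l < (st.length : Int))

theorem pv_forall2_mem_left {α β : Type} {R : α → β → Prop} {as : List α} {bs : List β}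
    (h : List.Forall₂ R as bs) {a : α} (ha : a ∈ as) : ∃ b ∈ bs, R a b := by
  induction h with
  | nil => cases ha
  | cons hr _ ih =>
    rw [List.mem_cons] at ha
    rcases ha with rfl | ha
    · exact ⟨_, List.mem_cons_self, hr⟩
    · obtain ⟨b, hb, hRb⟩ := ih ha
      exact ⟨b, List.mem_cons_of_mem _ hb, hRb⟩

theorem pv_forall2_mem_right {α β : Type} {R : α → β → Prop} {as : List α} {bs : List β}
    (h : List.Forall₂ R as bs) {b : β} (hb : b ∈ bs) : ∃ a ∈ as, R a b := by
  induction h with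
  | nil => cases hb
  | cons hr _ ih =>
    rw [List.mem_cons] at hb
    rcases hb with rfl | hb
    · exact ⟨_, List.mem_cons_self, hr⟩
    · obtain ⟨a, ha, hRa⟩ := ih hb
      exact ⟨a, List.mem_cons_of_mem _ ha, hRa⟩

theorem pv_forall2_filter {α β : Type} {R : α → β → Prop} {as : List α} {bs : List β}
    (h : List.Forall₂ R as bs) (p : α → Bool) (q : β → Bool)
    (hpq : ∀ a b, R a b → p a = q b) :
    List.Forall₂ R (as.filter p) (bs.filter q) := by
  induction h with
  | nil => simp
  | @cons a b as bs hr hrest ih =>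
    by_cases hp : p a = true
    · rw [List.filter_cons_of_pos hp, List.filter_cons_of_pos (by rw [← hpq a b hr]; exact hp)]
      exact List.Forall₂.cons hr ih
    · rw [List.filter_cons_of_neg hp,
        List.filter_cons_of_neg (by rw [← hpq a b hr]; exact hp)]
      exact ih

-- A's inner fold, characterised as two filters
theorem pvStepA_eq_aux (point : List Int) (cs : List (PySem.Set (List Int)))
    (acc : PySem.Set (List Int) × List (PySem.Set (List Int))) :
    cs.foldl
      (fun (st : PySem.Set (List Int) × List (PySem.Set (List Int))) c =>
        if c.any (fun p => decide (pvManhattan point p ≤ 3)) then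
          (PySem.Set.union st.1 c, st.2)
        else (st.1, st.2 ++ [c])) acc =
    ((cs.filter (fun c => c.any (fun p => decide (pvManhattan point p ≤ 3)))).foldl
        PySem.Set.union acc.1,
      acc.2 ++ cs.filter (fun c => !c.any (fun p => decide (pvManhattan point p ≤ 3)))) := by
  induction cs generalizing acc with
  | nil => simp
  | cons c cs ih =>
    by_cases hc : c.any (fun p => decide (pvManhattan point p ≤ 3)) = true
    · rw [List.foldl_cons, if_pos hc, ih]
      simp only [List.filter_cons, hc, if_true, Bool.not_true, Bool.false_eq_true, if_false,
        List.foldl_cons]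
    · rw [List.foldl_cons, if_neg hc]
      rw [ih]
      have hc' : (c.any fun p => decide (pvManhattan point p ≤ 3)) = false :=
        Bool.eq_false_iff.mpr hc
      simp only [List.filter_cons, hc', Bool.false_eq_true, if_false, Bool.not_false, if_true]
      simp

theorem pvStepA_eq (point : List Int) (cs : List (PySem.Set (List Int))) :
    pvStepA cs point =
      cs.filter (fun c => !c.any (fun p => decide (pvManhattan point p ≤ 3))) ++
      [(cs.filter (fun c => c.any (fun p => decide (pvManhattan point p ≤ 3)))).foldl
          PySem.Set.union (PySem.Set.ofList [point])] := by
  simp only [pvStepA]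
  rw [pvStepA_eq_aux]
  simp

theorem pv_mem_foldl_union {α : Type} [BEq α] [LawfulBEq α] (l : List (PySem.Set α))
    (s : PySem.Set α) (x : α) :
    x ∈ l.foldl PySem.Set.union s ↔ x ∈ s ∨ ∃ c ∈ l, x ∈ c := by
  induction l generalizing s with
  | nil => simp
  | cons c l ih =>
    simp [ih, PySem.Set.mem_union]
    tauto

theorem pv_forall2_imp_mem {α β : Type} {R R' : α → β → Prop} {as : List α} {bs : List β}
    (h : List.Forall₂ R as bs) (himp : ∀ a b, b ∈ bs → R a b → R' a b) :
    List.Forall₂ R' as bs := by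
  induction h with
  | nil => exact List.Forall₂.nil
  | cons hr _ ih =>
    exact List.Forall₂.cons (himp _ _ List.mem_cons_self hr)
      (ih fun a b hb => himp a b (List.mem_cons_of_mem _ hb))

-- the step preserves the invariant
theorem pvInv_step (cs : List (PySem.Set (List Int))) (st : List (List Int × Int))
    (point : List Int) (h : pvInv cs st) : pvInv (pvStepA cs point) (pvStepB st point) := by
  obtain ⟨g, hF, hnd, hsub, hbd⟩ := h
  rw [pvStepA_eq]
  have hnear_mem : ∀ l : Int,
      (l ∈ (st.filter fun e => decide (pvManhattan point e.1 ≤ 3)).map Prod.snd) ↔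
      ∃ p, (p, l) ∈ st ∧ pvManhattan point p ≤ 3 := by
    intro l
    constructor
    · intro hl
      obtain ⟨e, he, rfl⟩ := List.mem_map.1 hl
      obtain ⟨he1, he2⟩ := List.mem_filter.1 he
      exact ⟨e.1, by simpa using he1, by simpa using he2⟩
    · rintro ⟨p, hp, hadj⟩
      exact List.mem_map.2 ⟨(p, l), List.mem_filter.2 ⟨hp, by simpa using hadj⟩, rfl⟩
  have corr : ∀ (c : PySem.Set (List Int)) (l : Int), (∀ p, p ∈ c ↔ (p, l) ∈ st) →
      ((c.any fun p => decide (pvManhattan point p ≤ 3)) =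
        decide (l ∈ (st.filter fun e => decide (pvManhattan point e.1 ≤ 3)).map Prod.snd)) := by
    intro c l hcl
    have hiff : (c.any fun p => decide (pvManhattan point p ≤ 3)) = true ↔
        l ∈ (st.filter fun e => decide (pvManhattan point e.1 ≤ 3)).map Prod.snd := by
      rw [List.any_eq_true]
      constructor
      · rintro ⟨p, hp, hadj⟩
        exact (hnear_mem l).2 ⟨p, (hcl p).1 hp, by simpa using hadj⟩
      · intro hl
        obtain ⟨p, hpl, hadj⟩ := (hnear_mem l).1 hl
        exact ⟨p, (hcl p).2 hpl, by simpa using hadj⟩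
    by_cases hl : l ∈ (st.filter fun e => decide (pvManhattan point e.1 ≤ 3)).map Prod.snd
    · simp [hl, hiff.2 hl]
    · rw [decide_eq_false hl]
      exact Bool.eq_false_iff.2 fun hc => hl (hiff.1 hc)
  rcases hmin : PySem.List.min?
      ((st.filter fun e => decide (pvManhattan point e.1 ≤ 3)).map Prod.snd)
      (fun x => x) with _ | tgt
  · -- no near entry: B appends a fresh label, A keeps every constellation
    have hne : (st.filter fun e => decide (pvManhattan point e.1 ≤ 3)).map Prod.snd = [] :=
      (PySem.List.min?_eq_none_iff _ _).1 hmin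
    have hB : pvStepB st point = st ++ [(point, (st.length : Int))] := by
      simp only [pvStepB]
      rw [hmin]
    have hallP : ∀ c ∈ cs, (c.any fun p => decide (pvManhattan point p ≤ 3)) = false := by
      intro c hc
      obtain ⟨l, _, hcl, _⟩ := pv_forall2_mem_left hF hc
      rw [corr c l hcl, hne]
      simp
    have hkeep : (cs.filter fun c => !c.any fun p => decide (pvManhattan point p ≤ 3)) = cs :=
      List.filter_eq_self.2 fun c hc => by rw [hallP c hc]; rfl
    have hdrop : (cs.filter fun c => c.any fun p => decide (pvManhattan point p ≤ 3)) = [] :=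
      List.filter_eq_nil_iff.2 fun c hc => by rw [hallP c hc]; simp
    rw [hB, hkeep, hdrop]
    simp only [List.foldl_nil]
    refine ⟨g ++ [(st.length : Int)], ?_, ?_, ?_, ?_⟩
    · refine List.rel_append ?_ ?_
      · refine pv_forall2_imp_mem hF ?_
        rintro c l hlg ⟨hcl, hocc⟩
        have hlt : l < (st.length : Int) := (hbd l hlg).2
        constructor
        · intro p
          rw [hcl p, List.mem_append]
          simp only [List.mem_singleton]
          constructor
          · exact Or.inl
          · rintro (hp | hp)
            · exact hp
            · exact absurd (congrArg Prod.snd hp) (by simp; omega)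
        · rw [List.map_append, List.mem_append]; exact Or.inl hocc
      · refine List.forall₂_cons.2 ⟨⟨?_, ?_⟩, List.Forall₂.nil⟩
        · intro p
          constructor
          · intro hp
            rw [PySem.Set.mem_ofList] at hp
            simp only [List.mem_singleton] at hp
            subst hp
            simp
          · intro hp
            rw [List.mem_append] at hp
            rcases hp with hp | hp
            · have : (st.length : Int) ∈ st.map Prod.snd :=
                List.mem_map.2 ⟨(p, (st.length : Int)), hp, rfl⟩
              have := (hbd _ (hsub _ this)).2
              omega
            · simp only [List.mem_singleton, Prod.mk.injEq] at hp
              rw [PySem.Set.mem_ofList]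
              simp [hp.1]
        · simp
    · rw [List.nodup_append]
      refine ⟨hnd, List.nodup_singleton _, ?_⟩
      intro l hlg
      simp only [List.mem_singleton]
      intro heq
      have := (hbd l hlg).2
      omega
    · intro l hl
      rw [List.map_append, List.mem_append] at hl
      rw [List.mem_append]
      rcases hl with hl | hl
      · exact Or.inl (hsub l hl)
      · simp only [List.map_cons, List.mem_singleton] at hl ⊢
        simp at hl
        simp [hl]
    · intro l hl
      rw [List.mem_append] at hl
      rw [List.length_append]
      rcases hl with hl | hl
      · have := hbd l hl
        simp only [List.length_singleton]
        push_cast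
        omega
      · simp only [List.mem_singleton] at hl
        subst hl
        simp only [List.length_singleton]
        push_cast
        omega
  · -- some near entry: B relabels every near label to tgt, A merges the near constellations
    have htgt_near : tgt ∈ (st.filter fun e => decide (pvManhattan point e.1 ≤ 3)).map Prod.snd :=
      PySem.List.min?_mem hmin
    have htgt_st : tgt ∈ st.map Prod.snd := by
      obtain ⟨p, hp, _⟩ := (hnear_mem tgt).1 htgt_near
      exact List.mem_map.2 ⟨(p, tgt), hp, rfl⟩
    have htgt_g : tgt ∈ g := hsub _ htgt_st
    have hB : pvStepB st point =
        (st.map fun e =>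
          if e.2 ∈ (st.filter fun e => decide (pvManhattan point e.1 ≤ 3)).map Prod.snd
          then (e.1, tgt) else e) ++ [(point, tgt)] := by
      simp only [pvStepB]
      rw [hmin]
    rw [hB]
    have hmem_far : ∀ (p : List Int) (l : Int),
        l ∉ (st.filter fun e => decide (pvManhattan point e.1 ≤ 3)).map Prod.snd →
        ((p, l) ∈ (st.map fun e =>
            if e.2 ∈ (st.filter fun e => decide (pvManhattan point e.1 ≤ 3)).map Prod.snd
            then (e.1, tgt) else e) ++ [(point, tgt)] ↔ (p, l) ∈ st) := by
      intro p l hl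
      rw [List.mem_append]
      constructor
      · rintro (hm | hm)
        · obtain ⟨e, he, heq⟩ := List.mem_map.1 hm
          by_cases hc : e.2 ∈ (st.filter fun e => decide (pvManhattan point e.1 ≤ 3)).map Prod.snd
          · rw [if_pos hc] at heq
            exact absurd (congrArg Prod.snd heq).symm (by simp; exact fun h => hl (h ▸ htgt_near))
          · rw [if_neg hc] at heq
            exact heq ▸ he
        · simp only [List.mem_singleton, Prod.mk.injEq] at hm
          exact absurd (hm.2 ▸ htgt_near) hl
      · intro hm
        refine Or.inl (List.mem_map.2 ⟨(p, l), hm, ?_⟩)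
        rw [if_neg hl]
    have hmem_tgt : ∀ p : List Int,
        ((p, tgt) ∈ (st.map fun e =>
            if e.2 ∈ (st.filter fun e => decide (pvManhattan point e.1 ≤ 3)).map Prod.snd
            then (e.1, tgt) else e) ++ [(point, tgt)] ↔
          p = point ∨ ∃ e ∈ st, e.1 = p ∧
            e.2 ∈ (st.filter fun e => decide (pvManhattan point e.1 ≤ 3)).map Prod.snd) := by
      intro p
      rw [List.mem_append]
      constructor
      · rintro (hm | hm)
        · obtain ⟨e, he, heq⟩ := List.mem_map.1 hm
          by_cases hc : e.2 ∈ (st.filter fun e => decide (pvManhattan point e.1 ≤ 3)).map Prod.snd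
          · rw [if_pos hc] at heq
            exact Or.inr ⟨e, he, (congrArg Prod.fst heq).symm ▸ rfl, hc⟩
          · rw [if_neg hc] at heq
            have : e.2 = tgt := congrArg Prod.snd heq
            exact absurd (this ▸ htgt_near) hc
        · simp only [List.mem_singleton, Prod.mk.injEq] at hm
          exact Or.inl hm.1
      · rintro (rfl | ⟨e, he, rfl, hc⟩)
        · simp
        · exact Or.inl (List.mem_map.2 ⟨e, he, by rw [if_pos hc]⟩)
    have hUs : ∀ p : List Int,
        (∃ c ∈ cs.filter (fun c => c.any fun p => decide (pvManhattan point p ≤ 3)), p ∈ c) ↔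
        (∃ e ∈ st, e.1 = p ∧
          e.2 ∈ (st.filter fun e => decide (pvManhattan point e.1 ≤ 3)).map Prod.snd) := by
      intro p
      constructor
      · rintro ⟨c, hc, hp⟩
        obtain ⟨hcs, hPc⟩ := List.mem_filter.1 hc
        obtain ⟨l, hlg, hcl, _⟩ := pv_forall2_mem_left hF hcs
        refine ⟨(p, l), (hcl p).1 hp, rfl, ?_⟩
        have := corr _ _ hcl
        rw [hPc] at this
        exact of_decide_eq_true this.symm
      · rintro ⟨e, he, rfl, hc⟩
        have hl_g : e.2 ∈ g := hsub _ (List.mem_map.2 ⟨e, he, rfl⟩)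
        obtain ⟨c, hcs, hcl, _⟩ := pv_forall2_mem_right hF hl_g
        refine ⟨c, List.mem_filter.2 ⟨hcs, ?_⟩, (hcl e.1).2 (by simpa using he)⟩
        rw [corr _ _ hcl]
        exact decide_eq_true hc
    refine ⟨g.filter (fun l =>
      !decide (l ∈ (st.filter fun e => decide (pvManhattan point e.1 ≤ 3)).map Prod.snd)) ++
        [tgt], ?_, ?_, ?_, ?_⟩
    · refine List.rel_append ?_ ?_
      · have hfilt := pv_forall2_filter hF
          (fun c => !c.any fun p => decide (pvManhattan point p ≤ 3))
          (fun l => !decide (l ∈ (st.filter fun e => decide (pvManhattan point e.1 ≤ 3)).map Prod.snd))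
          (fun a b hR => by simp only [corr a b hR.1])
        refine pv_forall2_imp_mem hfilt ?_
        rintro c l hlf ⟨hcl, hocc⟩
        have hlnear : l ∉ (st.filter fun e => decide (pvManhattan point e.1 ≤ 3)).map Prod.snd := by
          have := (List.mem_filter.1 hlf).2
          simpa using this
        constructor
        · intro p
          rw [hcl p, hmem_far p l hlnear]
        · obtain ⟨e, he, heq⟩ := List.mem_map.1 hocc
          refine List.mem_map.2 ⟨?_, ?_, ?_⟩
          · exact e
          · rw [List.mem_append]
            refine Or.inl (List.mem_map.2 ⟨e, he, ?_⟩)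
            rw [if_neg (heq ▸ hlnear)]
          · exact heq
      · refine List.forall₂_cons.2 ⟨⟨?_, ?_⟩, List.Forall₂.nil⟩
        · intro p
          rw [pv_mem_foldl_union, hmem_tgt p]
          simp only [PySem.Set.mem_ofList, List.mem_singleton]
          exact or_congr Iff.rfl (hUs p)
        · refine List.mem_map.2 ⟨(point, tgt), ?_, rfl⟩
          rw [List.mem_append]
          simp
    · rw [List.nodup_append]
      refine ⟨hnd.filter _, List.nodup_singleton _, ?_⟩
      intro l hlf b hb
      rw [List.mem_singleton] at hb
      subst hb
      intro heq
      rw [heq] at hlf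
      have := (List.mem_filter.1 hlf).2
      simp only [Bool.not_eq_true', decide_eq_false_iff_not] at this
      exact this htgt_near
    · intro l hl
      rw [List.map_append, List.mem_append] at hl
      rw [List.mem_append]
      rcases hl with hl | hl
      · obtain ⟨e', he', rfl⟩ := List.mem_map.1 hl
        obtain ⟨e, he, rfl⟩ := List.mem_map.1 he'
        by_cases hc : e.2 ∈ (st.filter fun e => decide (pvManhattan point e.1 ≤ 3)).map Prod.snd
        · rw [if_pos hc]
          simp
        · rw [if_neg hc]
          refine Or.inl (List.mem_filter.2 ⟨hsub _ (List.mem_map.2 ⟨e, he, rfl⟩), ?_⟩)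
          simpa using hc
      · simp only [List.map_cons, List.map_nil, List.mem_singleton] at hl
        simp [hl]
    · intro l hl
      rw [List.mem_append] at hl
      rw [List.length_append, List.length_map, List.length_singleton]
      rcases hl with hl | hl
      · have := hbd l (List.mem_of_mem_filter hl)
        push_cast
        omega
      · simp only [List.mem_singleton] at hl
        have := hbd tgt htgt_g
        rw [hl]
        push_cast
        omega

theorem pvInv_foldl (points : List (List Int)) :
    pvInv (points.foldl pvStepA []) (points.foldl pvStepB []) := by
  have base : pvInv [] [] := ⟨[], by simp, by simp, by simp, by simp⟩
  have : ∀ (l : List (List Int)) cs st, pvInv cs st →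
      pvInv (l.foldl pvStepA cs) (l.foldl pvStepB st) := by
    intro l
    induction l with
    | nil => intro cs st h; exact h
    | cons p l ih => intro cs st h; exact ih _ _ (pvInv_step cs st p h)
  exact this points [] [] base

theorem pv_count_eq (cs : List (PySem.Set (List Int))) (st : List (List Int × Int))
    (h : pvInv cs st) :
    (cs.length : Int) = ((PySem.Set.ofList (st.map Prod.snd)).length : Int) := by
  obtain ⟨g, hF, hnd, hsub, _⟩ := h
  have hlen : cs.length = g.length := hF.length_eq
  have hmem : ∀ l : Int, l ∈ PySem.Set.ofList (st.map Prod.snd) ↔ l ∈ g := by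
    intro l
    rw [PySem.Set.mem_ofList]
    constructor
    · exact fun hl => hsub l hl
    · intro hl
      obtain ⟨c, _, ⟨_, hocc⟩⟩ := pv_forall2_mem_right hF hl
      exact hocc
  have h1 : (PySem.Set.ofList (st.map Prod.snd)).toFinset = g.toFinset := by
    ext l; simp only [List.mem_toFinset]; exact hmem l
  have h2 : (PySem.Set.ofList (st.map Prod.snd)).length = g.length := by
    rw [← List.toFinset_card_of_nodup (PySem.Set.nodup_ofList _),
      ← List.toFinset_card_of_nodup hnd, h1]
  omega

-- ===== VERDICT (by name: the statement is the Claim_ definition above) =====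
theorem count_constellations_spec : Claim_equal_count_constellations := by
  intro points _
  unfold Spec_count_constellations count_constellations count_constellations_alt
  exact pv_count_eq _ _ (pvInv_foldl points)
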